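-- pv_equiv track=rewrite | github.com/NicolasPiron/crossmodal-sequences | src/stimuli_manager.py | check_transitions
-- ===== SOURCE A (Python) =====
-- def count_dupes(arr):
--     '''Count the number of duplicates in a list'''
--     seen = set()
--     duplicate_counter = 0
--     for item in arr:
--         if item in seen:
--             duplicate_counter += 1
--         else:
--             seen.add(item)
--     return duplicate_counter
--
-- def check_transitions(order1: str, order2: str):
--     ''' Check if the transitions between two sequences are unique'''
--     if order1 == order2:
--         return False
--     transitions = []
--     for order in (order1, order2):
--         order = ''.join(order)
--         for i in range(len(order)-1):
--             transitions.append(order[i:i+2])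
--     if count_dupes(transitions) > 0:
--         return False
--     return True
-- ===== SOURCE B (Python) =====
-- def check_transitions(order1: str, order2: str):
--     '''Check if the transitions between two sequences are unique'''
--     if order1 == order2:
--         return False
--     transitions = [s[i:i+2] for s in (order1, order2) for i in range(len(s)-1)]
--     ts = sorted(transitions)
--     for prev, cur in zip(ts, ts[1:]):
--         if prev == cur:
--             return False
--     return True
-- ===== Notes on version B (the rewrite author's own statement) =====
-- stated objective: alternative
-- what changed: Duplicate detection among the 2-char transitions is done by sorting the transition list once and scanning adjacent pairs with early exit, instead of A's hash-set membership counting over the whole list.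
import Mathlib
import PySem

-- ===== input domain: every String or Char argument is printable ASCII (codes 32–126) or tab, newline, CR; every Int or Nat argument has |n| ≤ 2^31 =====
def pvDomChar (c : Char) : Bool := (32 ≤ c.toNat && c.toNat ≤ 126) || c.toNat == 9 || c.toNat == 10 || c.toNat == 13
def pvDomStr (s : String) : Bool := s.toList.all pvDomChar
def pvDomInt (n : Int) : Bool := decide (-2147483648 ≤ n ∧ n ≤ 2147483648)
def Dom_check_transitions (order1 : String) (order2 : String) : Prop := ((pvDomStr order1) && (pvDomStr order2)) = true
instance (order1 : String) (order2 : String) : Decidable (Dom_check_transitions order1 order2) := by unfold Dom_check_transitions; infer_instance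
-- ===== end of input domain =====

-- B replaces A's hash-set duplicate counting over the transition list by a sort
-- followed by a single adjacent-pair scan with early exit (objective: alternative).

-- ===== PORT A =====
def count_dupes (arr : List String) : Int :=
  (arr.foldl (fun (st : PySem.Set String × Int) item =>
      if PySem.Set.contains st.1 item then (st.1, st.2 + 1)
      else (PySem.Set.add st.1 item, st.2)) (PySem.Set.empty, 0)).2

def check_transitions (order1 : String) (order2 : String) : Bool :=
  if order1 == order2 then false
  else
    -- ''.join(order) on a str is the identity, so 'order' is kept unchanged
    let transitions := [order1, order2].foldl (fun ts order =>
      (PySem.List.pyRange 0 (PySem.Str.len order - 1)).foldl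
        (fun ts i => ts ++ [PySem.Str.slice order (some i) (some (i + 2))]) ts) ([] : List String)
    if count_dupes transitions > 0 then false else true

-- ===== PORT B =====
-- [s[i:i+2] for i in range(len(s)-1)]
def pvPairs (s : String) : List String :=
  (PySem.List.pyRange 0 (PySem.Str.len s - 1)).map
    (fun i => PySem.Str.slice s (some i) (some (i + 2)))

-- 'for prev, cur in zip(ts, ts[1:]): if prev == cur: return False' then 'return True'
def pvScanAdj : List String → Bool
  | a :: b :: t => if a == b then false else pvScanAdj (b :: t)
  | _ => true

def check_transitions_alt (order1 : String) (order2 : String) : Bool :=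
  if order1 == order2 then false
  else
    pvScanAdj (PySem.List.sorted ([order1, order2].flatMap pvPairs) (fun x => x) false)

-- ===== PRECONDITION & SPEC =====
def Spec_check_transitions (order1 : String) (order2 : String) (out : Bool) : Prop := out = check_transitions_alt order1 order2
instance (order1 : String) (order2 : String) (out : Bool) : Decidable (Spec_check_transitions order1 order2 out) := by unfold Spec_check_transitions; infer_instance

-- ===== CLAIM (what is proved, stated in full; the proofs are below) =====
def Claim_equal_check_transitions : Prop := ∀ (order1 : String) (order2 : String), Dom_check_transitions order1 order2 → Spec_check_transitions order1 order2 (check_transitions order1 order2)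

-- ===== LEMMAS AND PROOFS =====

-- the step of count_dupes's loop
def pvStep (st : PySem.Set String × Int) (item : String) : PySem.Set String × Int :=
  if PySem.Set.contains st.1 item then (st.1, st.2 + 1)
  else (PySem.Set.add st.1 item, st.2)

theorem pvStep_mono (arr : List String) (seen : PySem.Set String) (c : Int) :
    c ≤ (arr.foldl pvStep (seen, c)).2 := by
  induction arr generalizing seen c with
  | nil => simp
  | cons a t ih =>
    simp only [List.foldl]
    by_cases h : a ∈ seen
    · rw [show pvStep (seen, c) a = (seen, c + 1) by simp [pvStep, h]]
      exact le_trans (by omega) (ih seen (c + 1))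
    · rw [show pvStep (seen, c) a = (PySem.Set.add seen a, c) by simp [pvStep, h]]
      exact ih _ c

theorem pvFold_eq_iff (arr : List String) (seen : PySem.Set String) (c : Int) :
    (arr.foldl pvStep (seen, c)).2 = c ↔ (arr.Nodup ∧ ∀ x ∈ arr, x ∉ seen) := by
  induction arr generalizing seen c with
  | nil => simp
  | cons a t ih =>
    simp only [List.foldl]
    by_cases h : a ∈ seen
    · rw [show pvStep (seen, c) a = (seen, c + 1) by simp [pvStep, h]]
      have hmono := pvStep_mono t seen (c + 1)
      constructor
      · intro hc; omega
      · rintro ⟨-, hall⟩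
        exact absurd h (hall a (by simp))
    · rw [show pvStep (seen, c) a = (PySem.Set.add seen a, c) by simp [pvStep, h]]
      rw [ih]
      simp only [List.nodup_cons, List.mem_cons, PySem.Set.mem_add]
      constructor
      · rintro ⟨hnd, hall⟩
        refine ⟨⟨fun hm => (hall a hm) (Or.inr rfl), hnd⟩, ?_⟩
        rintro x (rfl | hx)
        · exact h
        · exact fun hs => (hall x hx) (Or.inl hs)
      · rintro ⟨⟨hat, hnd⟩, hall⟩
        refine ⟨hnd, fun x hx => ?_⟩
        rintro (hs | rfl)
        · exact (hall x (Or.inr hx)) hs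
        · exact hat hx

theorem count_dupes_eq_zero_iff (arr : List String) :
    count_dupes arr = 0 ↔ arr.Nodup := by
  show (arr.foldl pvStep (PySem.Set.empty, 0)).2 = 0 ↔ arr.Nodup
  rw [pvFold_eq_iff]
  simp [PySem.Set.empty]

theorem count_dupes_nonneg (arr : List String) : 0 ≤ count_dupes arr := by
  exact pvStep_mono arr PySem.Set.empty 0

theorem pvScanAdj_iff (l : List String) (h : l.Pairwise (· ≤ ·)) :
    pvScanAdj l = true ↔ l.Nodup := by
  induction l with
  | nil => simp [pvScanAdj]
  | cons a t ih =>
    cases t with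
    | nil => simp [pvScanAdj]
    | cons b t2 =>
      have hab : a ≤ b := (List.pairwise_cons.1 h).1 b (by simp)
      have ht : (b :: t2).Pairwise (· ≤ ·) := (List.pairwise_cons.1 h).2
      by_cases hcase : a = b
      · subst hcase
        simp [pvScanAdj, List.nodup_cons]
      · have hbeq : (a == b) = false := beq_eq_false_iff_ne.2 hcase
        rw [show pvScanAdj (a :: b :: t2) = pvScanAdj (b :: t2) by simp [pvScanAdj, hbeq]]
        rw [ih ht]
        have hnotmem : a ∉ b :: t2 := by
          intro hm
          rcases List.mem_cons.1 hm with rfl | hx2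
          · exact hcase rfl
          · have hbx : b ≤ a := (List.pairwise_cons.1 ht).1 a hx2
            exact hcase (le_antisymm hab hbx)
        constructor
        · intro hn; exact List.nodup_cons.2 ⟨hnotmem, hn⟩
        · intro hn; exact (List.nodup_cons.1 hn).2

theorem foldl_app_map (xs : List Int) (f : Int → String) (init : List String) :
    xs.foldl (fun acc i => acc ++ [f i]) init = init ++ xs.map f := by
  induction xs generalizing init with
  | nil => simp
  | cons a t ih => simp [List.foldl, ih]

-- ===== VERDICT (by name: the statement is the Claim_ definition above) =====
theorem check_transitions_spec : Claim_equal_check_transitions := by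
  intro o1 o2 _
  unfold Spec_check_transitions check_transitions check_transitions_alt
  by_cases h : o1 = o2
  · simp [h]
  · have hb : (o1 == o2) = false := beq_eq_false_iff_ne.2 h
    simp only [hb, Bool.false_eq_true, if_false]
    have htrans :
        [o1, o2].foldl (fun ts order =>
          (PySem.List.pyRange 0 (PySem.Str.len order - 1)).foldl
            (fun ts i => ts ++ [PySem.Str.slice order (some i) (some (i + 2))]) ts)
          ([] : List String) = [o1, o2].flatMap pvPairs := by
      simp only [List.foldl, List.flatMap_cons, List.flatMap_nil, List.append_nil, pvPairs]
      rw [foldl_app_map, foldl_app_map]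
      simp
    rw [htrans]
    set ts := [o1, o2].flatMap pvPairs with hts
    have hcount := count_dupes_eq_zero_iff ts
    have hscan := pvScanAdj_iff (PySem.List.sorted ts (fun x => x) false)
      (PySem.List.sorted_pairwise ts (fun x => x))
    have hperm := (PySem.List.sorted_perm ts (fun x => x) false).nodup_iff
    by_cases hn : ts.Nodup
    · have h0 : count_dupes ts = 0 := hcount.2 hn
      have hs : pvScanAdj (PySem.List.sorted ts (fun x => x) false) = true :=
        hscan.2 (hperm.2 hn)
      simp [h0, hs]
    · have hc0 : count_dupes ts ≠ 0 := fun e => hn (hcount.1 e)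
      have hpos : count_dupes ts > 0 :=
        lt_of_le_of_ne (count_dupes_nonneg ts) (Ne.symm hc0)
      have hs : pvScanAdj (PySem.List.sorted ts (fun x => x) false) = false := by
        cases hsa : pvScanAdj (PySem.List.sorted ts (fun x => x) false) with
        | false => rfl
        | true => exact absurd (hperm.1 (hscan.1 hsa)) hn
      simp [hpos, hs]
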